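-- pv_equiv track=rewrite | github.com/DrBr4n/LA2 | treino1/apelidos.py | apelidos
-- ===== SOURCE A (Python) =====
-- def apelidos(nomes):
--
--     ordN = sorted(nomes, key = str.lower)
--     #['Jorge Manuel Matos Sousa Pinto', 'Jose Bernardo Barros', 'Jose Carlos Bacelar Almeida', 'Manuel Alcino Pereira Cunha',
--     # 'Maria Joao Frade', 'Xico Esperto']
--
--     names = []
--
--     for name in ordN:
--         names.append(name.split())
--
--     #namesOrdMatrix = sorted(names, key = len)
--     namesOrdMatrix = sorted(names, key = lambda x : len(x) - 1)
--
--     namesOrd = []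
--     for subname in namesOrdMatrix:
--         namesOrd.append(" ".join(subname))
--
--     return namesOrd
-- ===== SOURCE B (Python) =====
-- def apelidos(nomes):
--     # One composite-key stable sort of the original names, then normalize whitespace on output.
--     return [" ".join(n.split())
--             for n in sorted(nomes, key=lambda n: (len(n.split()), n.lower()))]
-- ===== Notes on version B (the rewrite author's own statement) =====
-- stated objective: simpler
-- what changed: Replaces A's pipeline (sort by lowercase, split every name, second stable sort of the split lists by word count, join loop) with a single composite-key sort of the original names by (word count, lowercase) plus one output comprehension.
import Mathlib
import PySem

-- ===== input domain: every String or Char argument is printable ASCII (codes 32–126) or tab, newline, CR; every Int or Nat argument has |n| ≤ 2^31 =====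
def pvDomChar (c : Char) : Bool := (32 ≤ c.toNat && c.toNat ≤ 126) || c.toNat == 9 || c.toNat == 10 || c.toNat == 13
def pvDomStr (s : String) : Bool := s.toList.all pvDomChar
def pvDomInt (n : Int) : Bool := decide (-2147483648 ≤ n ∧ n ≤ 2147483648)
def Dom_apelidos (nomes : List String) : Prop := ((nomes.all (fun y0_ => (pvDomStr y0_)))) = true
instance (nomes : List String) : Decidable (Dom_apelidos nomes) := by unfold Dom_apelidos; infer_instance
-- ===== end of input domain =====

-- B replaces A's two sequential stable sorts + split/join loops by ONE composite-key sort
-- (word count, lowercase) of the original names plus an output map: simpler decomposition.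

-- ===== PORT A =====
def apelidos (nomes : List String) : List String :=
  let ordN := PySem.List.sorted nomes (fun s => PySem.Str.lower s)
  let names := ordN.foldl (fun acc name => acc ++ [PySem.Str.split₀ name]) []
  let namesOrdMatrix := PySem.List.sorted names (fun x => (x.length : Int) - 1)
  let namesOrd := namesOrdMatrix.foldl (fun acc subname => acc ++ [PySem.Str.join " " subname]) []
  namesOrd

-- ===== PORT B =====
def apelidos_alt (nomes : List String) : List String :=
  (PySem.List.sorted2 nomes
      (fun n => ((PySem.Str.split₀ n).length : Int))
      (fun n => PySem.Str.lower n)).map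
    (fun n => PySem.Str.join " " (PySem.Str.split₀ n))

-- ===== PRECONDITION & SPEC =====
def Spec_apelidos (nomes : List String) (out : List String) : Prop := out = apelidos_alt nomes
instance (nomes : List String) (out : List String) : Decidable (Spec_apelidos nomes out) := by unfold Spec_apelidos; infer_instance

-- ===== CLAIM (what is proved, stated in full; the proofs are below) =====
def Claim_equal_apelidos : Prop := ∀ (nomes : List String), Dom_apelidos nomes → Spec_apelidos nomes (apelidos nomes)

-- ===== LEMMAS AND PROOFS =====

-- insertBy commutes with mapping f when the comparator factors through f
theorem insertBy_map {α β : Type} (f : α → β) (bf : β → β → Bool) (x : α) (acc : List α) :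
    PySem.List.insertBy bf (f x) (acc.map f)
      = (PySem.List.insertBy (fun a b => bf (f a) (f b)) x acc).map f := by
  induction acc with
  | nil => rfl
  | cons y ys ih => simp only [List.map_cons, PySem.List.insertBy]; split_ifs <;> simp [ih]

theorem foldl_insertBy_map {α β : Type} (f : α → β) (bf : β → β → Bool)
    (xs : List α) (acc : List α) :
    (xs.map f).foldl (fun acc x => PySem.List.insertBy bf x acc) (acc.map f)
      = (xs.foldl (fun acc x => PySem.List.insertBy (fun a b => bf (f a) (f b)) x acc) acc).map f := by
  induction xs generalizing acc with
  | nil => rfl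
  | cons x xs ih => simp only [List.map_cons, List.foldl_cons, insertBy_map]; exact ih _

-- sorted of a mapped list = map of sorted under the composed key
theorem sorted_map {α β κ : Type} [LT κ] [DecidableLT κ] (f : α → β) (xs : List α) (k : β → κ) :
    PySem.List.sorted (xs.map f) k = (PySem.List.sorted xs (fun a => k (f a))).map f := by
  simpa only [PySem.List.sorted, if_neg (by simp : ¬ (false = true)), List.map_nil]
    using foldl_insertBy_map f (fun a b => decide (k a < k b)) xs []

-- comparator congruence: keys inducing the same strict order sort identically
theorem sorted_key_congr {α κ κ' : Type} [LT κ] [DecidableLT κ] [LT κ'] [DecidableLT κ']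
    (xs : List α) (k : α → κ) (k' : α → κ') (h : ∀ a b, k a < k b ↔ k' a < k' b) :
    PySem.List.sorted xs k = PySem.List.sorted xs k' := by
  simp only [PySem.List.sorted, if_neg (by simp : ¬ (false = true))]
  have hb : (fun a b => decide (k a < k b)) = (fun a b => decide (k' a < k' b)) := by
    funext a b; simp [h]
  rw [hb]

-- sorted2 is sorted under the lexicographic key
theorem sorted2_eq_sorted_lex {α κ₁ κ₂ : Type} [LinearOrder κ₁] [LinearOrder κ₂]
    (xs : List α) (k1 : α → κ₁) (k2 : α → κ₂) :
    PySem.List.sorted2 xs k1 k2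
      = PySem.List.sorted xs (fun x => toLex (k1 x, k2 x)) := by
  simp only [PySem.List.sorted2, PySem.List.sorted, if_neg (by simp : ¬ (false = true))]
  have hb : (fun a b => decide (k1 a < k1 b) || (!decide (k1 b < k1 a) && decide (k2 a < k2 b)))
      = (fun a b : α => decide (toLex (k1 a, k2 a) < toLex (k1 b, k2 b))) := by
    funext a b
    rcases lt_trichotomy (k1 a) (k1 b) with h | h | h
    · simp [Prod.Lex.toLex_lt_toLex, h, not_lt_of_gt h]
    · simp [Prod.Lex.toLex_lt_toLex, h]
    · simp [Prod.Lex.toLex_lt_toLex, h, not_lt_of_gt h, ne_of_gt h]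
  rw [hb]

-- stripping an index decoration: when decorations strictly increase along the list,
-- sorting by (key, decoration) and dropping decorations = sorting the plain list by key
theorem insertBy_strip {α β κ : Type} [LinearOrder κ] [LinearOrder β] (k : α → κ)
    (x : α × β) (acc : List (α × β)) (hacc : ∀ p ∈ acc, p.2 < x.2) :
    (PySem.List.insertBy (fun p q => decide (toLex (k p.1, p.2) < toLex (k q.1, q.2))) x acc).map Prod.fst
      = PySem.List.insertBy (fun a b => decide (k a < k b)) x.1 (acc.map Prod.fst) := by
  induction acc with
  | nil => rfl
  | cons y ys ih =>
    have hy : y.2 < x.2 := hacc y (List.mem_cons_self)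
    have hcmp : decide (toLex (k x.1, x.2) < toLex (k y.1, y.2)) = decide (k x.1 < k y.1) := by
      simp only [Prod.Lex.toLex_lt_toLex, decide_eq_decide]
      constructor
      · rintro (h | ⟨he, h⟩)
        · exact h
        · exact absurd h (not_lt_of_gt hy)
      · exact Or.inl
    simp only [PySem.List.insertBy, hcmp, List.map_cons]
    split_ifs <;> simp [ih (fun p hp => hacc p (List.mem_cons_of_mem _ hp))]

theorem foldl_insertBy_strip {α β κ : Type} [LinearOrder κ] [LinearOrder β] (k : α → κ)
    (xs acc : List (α × β)) (hxs : xs.Pairwise (fun p q => p.2 < q.2))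
    (hacc : ∀ p ∈ acc, ∀ q ∈ xs, p.2 < q.2) :
    (xs.foldl (fun acc x => PySem.List.insertBy
        (fun p q => decide (toLex (k p.1, p.2) < toLex (k q.1, q.2))) x acc) acc).map Prod.fst
      = (xs.map Prod.fst).foldl
          (fun acc x => PySem.List.insertBy (fun a b => decide (k a < k b)) x acc)
          (acc.map Prod.fst) := by
  induction xs generalizing acc with
  | nil => rfl
  | cons x xs ih =>
    simp only [List.map_cons, List.foldl_cons]
    rw [← insertBy_strip k x acc (fun p hp => hacc p hp x List.mem_cons_self)]
    exact ih _ (List.pairwise_cons.mp hxs).2 (by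
      intro p hp q hq
      rcases (PySem.List.mem_insertBy _ _ _ _).mp hp with rfl | hp'
      · exact (List.pairwise_cons.mp hxs).1 q hq
      · exact hacc p hp' q (List.mem_cons_of_mem _ hq))

theorem sorted_decorated {α β κ : Type} [LinearOrder κ] [LinearOrder β]
    (xs : List (α × β)) (k : α → κ) (h : xs.Pairwise (fun p q => p.2 < q.2)) :
    (PySem.List.sorted xs (fun p => toLex (k p.1, p.2))).map Prod.fst
      = PySem.List.sorted (xs.map Prod.fst) k := by
  simpa only [PySem.List.sorted, if_neg (by simp : ¬ (false = true)), List.map_nil]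
    using foldl_insertBy_strip k xs [] h (by simp)

-- sorted output is STRICTLY increasing when the key is injective on a duplicate-free input
theorem sorted_pairwise_lt {α κ : Type} [LinearOrder κ] (xs : List α) (key : α → κ)
    (hnd : xs.Nodup) (hinj : ∀ a ∈ xs, ∀ b ∈ xs, key a = key b → a = b) :
    (PySem.List.sorted xs key).Pairwise (fun a b => key a < key b) := by
  have hp := PySem.List.sorted_pairwise xs key
  have hnd' : (PySem.List.sorted xs key).Nodup :=
    (PySem.List.sorted_perm xs key false).nodup_iff.mpr hnd
  refine (hp.and hnd').imp_of_mem ?_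
  intro a b ha hb ⟨hle, hne⟩
  refine lt_of_le_of_ne hle (fun he => hne ?_)
  exact hinj a ((PySem.List.mem_sorted _ _ _ _).mp ha) b ((PySem.List.mem_sorted _ _ _ _).mp hb) he

-- injectivity on zipIdx members: equal indices force equal pairs
theorem zipIdx_inj {α : Type} (xs : List α) (p q : α × Nat)
    (hp : p ∈ xs.zipIdx) (hq : q ∈ xs.zipIdx) (h : p.2 = q.2) : p = q := by
  have := List.inj_on_of_nodup_map (f := Prod.snd) (l := xs.zipIdx)
    (by simpa using List.nodup_zipIdx_map_snd xs)
  exact this hp hq h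

theorem zipIdx_pairwise_snd {α : Type} (xs : List α) :
    xs.zipIdx.Pairwise (fun p q => p.2 < q.2) := by
  rw [List.pairwise_iff_getElem]
  intro i j hi hj hij
  simp only [List.getElem_zipIdx]
  omega

-- MAIN: two stable sorts (second key, then first key) = one lexicographic-key sort
theorem stable_sort_compose {α κ₁ κ₂ : Type} [LinearOrder κ₁] [LinearOrder κ₂]
    (xs : List α) (k1 : α → κ₁) (k2 : α → κ₂) :
    PySem.List.sorted (PySem.List.sorted xs k2) k1 = PySem.List.sorted2 xs k1 k2 := by
  have hzp := zipIdx_pairwise_snd xs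
  have hznd : xs.zipIdx.Nodup := List.Nodup.of_map Prod.snd (by simpa using List.nodup_zipIdx_map_snd xs)
  have hfst : xs.zipIdx.map Prod.fst = xs := List.zipIdx_map_fst 0 xs
  -- decorated keys
  set K2 : α × Nat → Lex (κ₂ × Nat) := fun p => toLex (k2 p.1, p.2) with hK2def
  set Kbig : α × Nat → Lex (κ₁ × Lex (κ₂ × Nat)) := fun p => toLex (k1 p.1, toLex (k2 p.1, p.2)) with hKbigdef
  set Kassoc : α × Nat → Lex (Lex (κ₁ × κ₂) × Nat) := fun p => toLex (toLex (k1 p.1, k2 p.1), p.2) with hKassocdef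
  set S2' : List (α × Nat) := PySem.List.sorted xs.zipIdx K2 with hS2'def
  have hS2 : PySem.List.sorted xs k2 = S2'.map Prod.fst := by
    have h := sorted_decorated xs.zipIdx k2 hzp
    rw [hfst] at h; exact h.symm
  have hS2'perm : S2'.Perm xs.zipIdx := PySem.List.sorted_perm _ _ _
  have hK2inj : ∀ p ∈ xs.zipIdx, ∀ q ∈ xs.zipIdx, K2 p = K2 q → p = q := by
    intro p hp q hq h
    exact zipIdx_inj xs p q hp hq (by simpa using congrArg (fun x => (ofLex x).2) h)
  have hS2'sorted : S2'.Pairwise (fun p q => K2 p < K2 q) :=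
    sorted_pairwise_lt xs.zipIdx K2 hznd hK2inj
  -- second sort, decorated with the (k2, index) key as the new strictly increasing decoration
  set g : α × Nat → α × Lex (κ₂ × Nat) := fun p => (p.1, K2 p) with hgdef
  have hsnd'' : (S2'.map g).Pairwise (fun p q => p.2 < q.2) := by
    rw [List.pairwise_map]; exact hS2'sorted
  have hKbiginj : ∀ p ∈ xs.zipIdx, ∀ q ∈ xs.zipIdx, Kbig p = Kbig q → p = q := by
    intro p hp q hq h
    exact zipIdx_inj xs p q hp hq (by simpa using congrArg (fun x => (ofLex (ofLex x).2).2) h)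
  have hRlt : (PySem.List.sorted xs.zipIdx Kbig).Pairwise (fun p q => Kbig p < Kbig q) :=
    sorted_pairwise_lt xs.zipIdx Kbig hznd hKbiginj
  calc PySem.List.sorted (PySem.List.sorted xs k2) k1
      = PySem.List.sorted ((S2'.map g).map Prod.fst) k1 := by
        rw [hS2]; congr 1; simp [hgdef, List.map_map, Function.comp_def]
    _ = (PySem.List.sorted (S2'.map g) (fun p => toLex (k1 p.1, p.2))).map Prod.fst :=
        (sorted_decorated (S2'.map g) k1 hsnd'').symm
    _ = ((PySem.List.sorted S2' Kbig).map g).map Prod.fst := by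
        rw [sorted_map g S2' (fun p => toLex (k1 p.1, p.2))]
    _ = (PySem.List.sorted S2' Kbig).map Prod.fst := by
        simp [hgdef, List.map_map, Function.comp_def]
    _ = (PySem.List.sorted xs.zipIdx Kbig).map Prod.fst := by
        rw [PySem.List.sorted_eq_of_perm_of_pairwise_lt S2' (PySem.List.sorted xs.zipIdx Kbig) Kbig
            ((PySem.List.sorted_perm _ _ _).trans hS2'perm.symm) hRlt]
    _ = (PySem.List.sorted xs.zipIdx Kassoc).map Prod.fst := by
        rw [sorted_key_congr xs.zipIdx Kbig Kassoc (by
          intro p q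
          simp only [hKbigdef, hKassocdef, Prod.Lex.toLex_lt_toLex, toLex_inj, Prod.mk.injEq]
          tauto)]
    _ = PySem.List.sorted xs (fun x => toLex (k1 x, k2 x)) := by
        have h := sorted_decorated xs.zipIdx (fun x => toLex (k1 x, k2 x)) hzp
        rw [hfst] at h; exact h
    _ = PySem.List.sorted2 xs k1 k2 := (sorted2_eq_sorted_lex xs k1 k2).symm

-- ===== VERDICT (by name: the statement is the Claim_ definition above) =====
theorem apelidos_spec : Claim_equal_apelidos := by
  intro nomes _
  unfold Spec_apelidos apelidos apelidos_alt
  simp only [PySem.List.foldl_append_singleton_eq_map, List.nil_append]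
  rw [sorted_map, sorted_key_congr _ (fun n => ((PySem.Str.split₀ n).length : Int) - 1)
        (fun n => ((PySem.Str.split₀ n).length : Int)) (by intro a b; dsimp only; omega),
      stable_sort_compose, List.map_map]
  rfl
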